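-- pv_equiv track=rewrite | github.com/NankuF/PythonKnowledge | SOLVES/strings/13.py | swap_simbols
-- ===== SOURCE A (Python) =====
-- START = 1
--
-- def swap_simbols(s):
--     new_s = ''
--     for n, e in enumerate(s, START):
--         if n % 2:
--             if e in 'ab':
--                 new_s += 'C'
--             else:
--                 new_s += 'A'
--         else:
--             new_s += e
--     return new_s
-- ===== SOURCE B (Python) =====
-- def swap_simbols(s):
--     chunks = []
--     it = iter(s)
--     for c in it:
--         t = 'C' if c in 'ab' else 'A'
--         k = next(it, None)
--         chunks.append(t if k is None else t + k)
--     return ''.join(chunks)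
-- ===== Notes on version B (the rewrite author's own statement) =====
-- stated objective: alternative
-- what changed: Replaces the enumerate-and-parity-test loop by a pairwise consumer: an iterator is advanced two characters at a time, transforming the first of each pair and keeping the second verbatim, collecting chunks joined at the end.
import Mathlib
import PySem

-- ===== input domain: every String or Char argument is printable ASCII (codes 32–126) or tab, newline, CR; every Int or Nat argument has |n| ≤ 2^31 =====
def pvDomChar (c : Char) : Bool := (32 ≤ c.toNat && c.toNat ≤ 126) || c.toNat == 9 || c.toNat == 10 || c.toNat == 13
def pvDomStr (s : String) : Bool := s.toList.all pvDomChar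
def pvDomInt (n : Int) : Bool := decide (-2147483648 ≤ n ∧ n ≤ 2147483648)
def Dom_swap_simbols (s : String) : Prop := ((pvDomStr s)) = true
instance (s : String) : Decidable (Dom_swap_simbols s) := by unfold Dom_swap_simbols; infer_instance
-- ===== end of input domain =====

-- B replaces the enumerate-and-parity loop by a pairwise consumer that eats two characters at a time (alternative decomposition, same cost).


-- ===== PORT A =====
def swap_simbols (s : String) : String :=
  String.ofList ((PySem.List.enumerate s.toList 1).foldl
    (fun acc p =>
      if PySem.Int.mod p.1 2 ≠ 0 then
        (if PySem.Chars.isIn [p.2] ['a', 'b'] then acc ++ ['C'] else acc ++ ['A'])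
      else acc ++ [p.2]) [])

-- ===== PORT B =====
def pvRule (c : Char) : Char := if PySem.Chars.isIn [c] ['a', 'b'] then 'C' else 'A'

def pvChunks : List Char → List (List Char)
  | [] => []
  | [c] => [[pvRule c]]
  | c :: k :: rest => [pvRule c, k] :: pvChunks rest

def swap_simbols_alt (s : String) : String :=
  String.ofList (pvChunks s.toList).flatten

-- ===== PRECONDITION & SPEC =====
def Spec_swap_simbols (s : String) (out : String) : Prop := out = swap_simbols_alt s
instance (s : String) (out : String) : Decidable (Spec_swap_simbols s out) := by unfold Spec_swap_simbols; infer_instance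

-- ===== CLAIM (what is proved, stated in full; the proofs are below) =====
def Claim_equal_swap_simbols : Prop := ∀ (s : String), Dom_swap_simbols s → Spec_swap_simbols s (swap_simbols s)

-- ===== LEMMAS AND PROOFS =====
theorem pv_loop (l : List Char) (m : Int) (acc : List Char) :
    (PySem.List.enumerate l (2 * m + 1)).foldl
      (fun acc p =>
        if PySem.Int.mod p.1 2 ≠ 0 then
          (if PySem.Chars.isIn [p.2] ['a', 'b'] then acc ++ ['C'] else acc ++ ['A'])
        else acc ++ [p.2]) acc = acc ++ (pvChunks l).flatten := by
  induction l using pvChunks.induct generalizing m acc with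
  | case1 => simp [PySem.List.enumerate_nil, pvChunks]
  | case2 c =>
    simp only [PySem.List.enumerate_cons, PySem.List.enumerate_nil, List.foldl_cons,
      List.foldl_nil, pvChunks, pvRule, List.flatten]
    rw [if_pos (by rw [PySem.Int.mod_eq_emod_of_pos (by omega)]; omega)]
    split <;> simp
  | case3 c k rest ih =>
    simp only [PySem.List.enumerate_cons, List.foldl_cons]
    have h1 : PySem.Int.mod (2 * m + 1) 2 ≠ 0 := by
      rw [PySem.Int.mod_eq_emod_of_pos (by omega)]; omega
    have h2 : ¬ (PySem.Int.mod (2 * m + 1 + 1) 2 ≠ 0) := by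
      rw [PySem.Int.mod_eq_emod_of_pos (by omega)]; omega
    rw [if_pos h1, if_neg h2]
    have h3 : 2 * m + 1 + 1 + 1 = 2 * (m + 1) + 1 := by ring
    rw [h3, ih (m + 1)]
    by_cases h : PySem.Chars.isIn [c] ['a', 'b'] = true <;>
      simp [pvChunks, pvRule, h]

-- ===== VERDICT (by name: the statement is the Claim_ definition above) =====
theorem swap_simbols_spec : Claim_equal_swap_simbols := by
  intro s _
  unfold Spec_swap_simbols swap_simbols swap_simbols_alt
  have := pv_loop s.toList 0 []
  simp only [show (2 : Int) * 0 + 1 = 1 by ring] at this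
  rw [this]
  simp
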